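-- pv_equiv track=rewrite | github.com/tadeulazaro/ControllExpenses | jogo/vitoria1.py | encontrar_jogos_similares
-- ===== SOURCE A (Python) =====
-- def contar_acertos(jogo, resultado):
--     """
--     Conta o número de acertos entre um jogo e um resultado.
--     """
--     return len(set(jogo) & set(resultado))
--
-- def jogo_nao_foi_sorteado_com_pontos(resultados, jogo):
--     """
--     Verifica se o jogo já foi sorteado com 14 ou 15 pontos.
--     """
--     for resultado in resultados:
--         acertos = contar_acertos(jogo, resultado)
--         if acertos == 14 or acertos == 15:
--             return False  # Se o jogo já foi sorteado com 14 ou 15 acertos, não inclui ele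
--     return True  # Se o jogo não foi sorteado com 14 ou 15 acertos, inclui ele
--
-- def encontrar_jogos_similares(resultados, jogos_filtrados):
--     """
--     Encontra os 10 jogos mais semelhantes aos últimos resultados da Lotofácil,
--     considerando que o jogo não tenha saído com 14 ou 15 pontos em resultados passados.
--     """
--     jogos_similares = []
--
--     for jogo in jogos_filtrados:
--         if not jogo_nao_foi_sorteado_com_pontos(resultados, jogo):
--             continue  # Ignora o jogo se já saiu com 14 ou 15 pontos em algum resultado
--
--         similaridades = [contar_acertos(jogo, resultado) for resultado in resultados]
--         max_acertos = max(similaridades)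
--         jogos_similares.append((jogo, max_acertos))
--
--     # Ordena os jogos com base no número de acertos e seleciona os 10 mais semelhantes
--     jogos_similares.sort(key=lambda x: x[1], reverse=True)
--     return jogos_similares[:10]
-- ===== SOURCE B (Python) =====
-- def encontrar_jogos_similares(resultados, jogos_filtrados):
--     # One pass per jogo over precomputed result-sets, fusing the exclusion
--     # test and the maximum into a single loop with an early break.
--     rsets = [set(r) for r in resultados]
--     jogos_similares = []
--     for jogo in jogos_filtrados:
--         js = set(jogo)
--         best = 0
--         excluded = False
--         for r in rsets:
--             acertos = len(js & r)
--             if acertos == 14 or acertos == 15: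
--                 excluded = True
--                 break
--             if best < acertos:
--                 best = acertos
--         if not excluded:
--             jogos_similares.append((jogo, best))
--     jogos_similares.sort(key=lambda x: x[1], reverse=True)
--     return jogos_similares[:10]
-- ===== Notes on version B (the rewrite author's own statement) =====
-- stated objective: faster
-- what changed: Each resultado is converted to a set once up front and, per jogo, a single fused loop with early break computes the running maximum and the 14/15-point exclusion, instead of A's two separate scans that rebuild set(resultado) for every comparison.
import Mathlib
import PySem

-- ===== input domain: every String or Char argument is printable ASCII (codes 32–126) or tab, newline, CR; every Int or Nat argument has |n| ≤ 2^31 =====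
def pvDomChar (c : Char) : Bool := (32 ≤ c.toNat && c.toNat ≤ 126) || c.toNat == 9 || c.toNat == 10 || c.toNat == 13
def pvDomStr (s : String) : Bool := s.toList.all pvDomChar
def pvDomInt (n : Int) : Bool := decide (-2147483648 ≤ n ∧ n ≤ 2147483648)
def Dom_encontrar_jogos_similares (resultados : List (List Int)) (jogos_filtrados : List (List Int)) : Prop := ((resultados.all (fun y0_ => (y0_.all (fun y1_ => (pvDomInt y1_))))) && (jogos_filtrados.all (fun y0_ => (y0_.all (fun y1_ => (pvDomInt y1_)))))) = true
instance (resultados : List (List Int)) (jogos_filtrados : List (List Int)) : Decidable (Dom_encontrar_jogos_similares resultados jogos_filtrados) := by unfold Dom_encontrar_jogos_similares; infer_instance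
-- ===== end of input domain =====

-- B precomputes each resultado's set once and fuses the exclusion test and the maximum
-- into one loop per jogo (objective: faster by a constant factor); return values agree
-- wherever A returns (Pre_ excludes only the empty-resultados ValueError of max([])).

-- ===== PORT A =====
def contar_acertos (jogo : List Int) (resultado : List Int) : Int :=
  ((PySem.Set.inter (PySem.Set.ofList jogo) (PySem.Set.ofList resultado)).length : Int)

def jogo_nao_foi_sorteado_com_pontos (resultados : List (List Int)) (jogo : List Int) : Bool :=
  match resultados with
  | [] => true
  | resultado :: rest =>
    let acertos := contar_acertos jogo resultado
    if acertos = 14 ∨ acertos = 15 then false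
    else jogo_nao_foi_sorteado_com_pontos rest jogo

def encontrar_jogos_similares (resultados : List (List Int)) (jogos_filtrados : List (List Int)) : List (List Int × Int) :=
  let jogos_similares := jogos_filtrados.foldl (fun acc jogo =>
    if !(jogo_nao_foi_sorteado_com_pontos resultados jogo) then acc
    else
      let similaridades := resultados.map (fun resultado => contar_acertos jogo resultado)
      match PySem.List.max? similaridades (fun x => x) with
      | none => acc  -- max([]) raises ValueError in Python; these inputs are excluded by Pre_
      | some max_acertos => acc ++ [(jogo, max_acertos)]) []
  (PySem.List.sorted jogos_similares (fun x => x.2) true).take 10  -- jogos_similares[:10]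

-- ===== PORT B =====
-- the fused inner loop of Source B: running max 'best', 'none' = excluded (the break)
def pvAltScan (js : PySem.Set Int) (rsets : List (PySem.Set Int)) (best : Int) : Option Int :=
  match rsets with
  | [] => some best
  | r :: rest =>
    let acertos : Int := ((PySem.Set.inter js r).length : Int)
    if acertos = 14 ∨ acertos = 15 then none
    else pvAltScan js rest (if best < acertos then acertos else best)

def encontrar_jogos_similares_alt (resultados : List (List Int)) (jogos_filtrados : List (List Int)) : List (List Int × Int) :=
  let rsets := resultados.map (fun r => PySem.Set.ofList r)
  let jogos_similares := jogos_filtrados.foldl (fun acc jogo =>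
    match pvAltScan (PySem.Set.ofList jogo) rsets 0 with
    | none => acc
    | some best => acc ++ [(jogo, best)]) []
  (PySem.List.sorted jogos_similares (fun x => x.2) true).take 10  -- jogos_similares[:10]

-- ===== PRECONDITION & SPEC =====
-- Pre_ excludes only the inputs where A raises ValueError: a nonempty jogos_filtrados
-- with empty resultados makes A call max([]).
def Pre_encontrar_jogos_similares (resultados : List (List Int)) (jogos_filtrados : List (List Int)) : Prop :=
  resultados ≠ [] ∨ jogos_filtrados = []
instance (resultados : List (List Int)) (jogos_filtrados : List (List Int)) : Decidable (Pre_encontrar_jogos_similares resultados jogos_filtrados) := by unfold Pre_encontrar_jogos_similares; infer_instance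

def pvWitness_encontrar_jogos_similares : List (List Int) × List (List Int) := ([[1, 2]], [[1, 3], [4]])

def Spec_encontrar_jogos_similares (resultados : List (List Int)) (jogos_filtrados : List (List Int)) (out : List (List Int × Int)) : Prop := out = encontrar_jogos_similares_alt resultados jogos_filtrados
instance (resultados : List (List Int)) (jogos_filtrados : List (List Int)) (out : List (List Int × Int)) : Decidable (Spec_encontrar_jogos_similares resultados jogos_filtrados out) := by unfold Spec_encontrar_jogos_similares; infer_instance

-- ===== CLAIM (what is proved, stated in full; the proofs are below) =====
def Claim_equal_encontrar_jogos_similares : Prop := ∀ (resultados : List (List Int)) (jogos_filtrados : List (List Int)), Dom_encontrar_jogos_similares resultados jogos_filtrados → Pre_encontrar_jogos_similares resultados jogos_filtrados → Spec_encontrar_jogos_similares resultados jogos_filtrados (encontrar_jogos_similares resultados jogos_filtrados)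


-- ===== LEMMAS AND PROOFS =====

-- A's exclusion scan is an 'any' over resultados
theorem nao_eq_any (resultados : List (List Int)) (jogo : List Int) :
    jogo_nao_foi_sorteado_com_pontos resultados jogo
      = !(resultados.any (fun r => decide (contar_acertos jogo r = 14) || decide (contar_acertos jogo r = 15))) := by
  induction resultados with
  | nil => rfl
  | cons r rest ih =>
    simp only [jogo_nao_foi_sorteado_com_pontos, List.any_cons]
    by_cases h : contar_acertos jogo r = 14 ∨ contar_acertos jogo r = 15
    · simp [h]
      rcases h with h | h <;> simp [h]
    · push Not at h
      simp [h.1, h.2, ih]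

theorem if_lt_eq_max (b a : Int) : (if b < a then a else b) = max b a := by
  rw [max_def]; split_ifs with h1 h2 <;> omega

-- B's fused loop, characterised: 'none' iff some resultado hits 14/15, else the running max
theorem scan_eq (js : PySem.Set Int) (rsets : List (PySem.Set Int)) (b : Int) :
    pvAltScan js rsets b
      = if rsets.any (fun r => decide (((PySem.Set.inter js r).length : Int) = 14) || decide (((PySem.Set.inter js r).length : Int) = 15)) then none
        else some (rsets.foldl (fun acc r => max acc ((PySem.Set.inter js r).length : Int)) b) := by
  induction rsets generalizing b with
  | nil => rfl
  | cons r rest ih =>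
    simp only [pvAltScan, List.any_cons, List.foldl_cons]
    by_cases h : ((PySem.Set.inter js r).length : Int) = 14 ∨ ((PySem.Set.inter js r).length : Int) = 15
    · simp only [h]
      rcases h with h | h <;> simp [h]
    · push Not at h
      rw [ih, if_lt_eq_max]
      simp [h.1, h.2]

-- per-jogo step equality of the two accumulator functions, for nonempty resultados
theorem step_eq (resultados : List (List Int)) (h : resultados ≠ []) (acc : List (List Int × Int)) (jogo : List Int) :
    (if !(jogo_nao_foi_sorteado_com_pontos resultados jogo) then acc
     else
       match PySem.List.max? (resultados.map (fun resultado => contar_acertos jogo resultado)) (fun x => x) with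
       | none => acc
       | some m => acc ++ [(jogo, m)])
    = (match pvAltScan (PySem.Set.ofList jogo) (resultados.map (fun r => PySem.Set.ofList r)) 0 with
       | none => acc
       | some best => acc ++ [(jogo, best)]) := by
  rcases resultados with _ | ⟨r0, rest⟩
  · exact absurd rfl h
  rw [scan_eq, nao_eq_any]
  rw [List.any_map]
  have hcontar : ∀ r : List Int,
      ((PySem.Set.inter (PySem.Set.ofList jogo) (PySem.Set.ofList r)).length : Int) = contar_acertos jogo r :=
    fun _ => rfl
  by_cases hbad : (r0 :: rest).any (fun r => decide (contar_acertos jogo r = 14) || decide (contar_acertos jogo r = 15))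
  · have hbad' : (r0 :: rest).any ((fun r => decide (((PySem.Set.inter (PySem.Set.ofList jogo) r).length : Int) = 14)
        || decide (((PySem.Set.inter (PySem.Set.ofList jogo) r).length : Int) = 15)) ∘ fun r => PySem.Set.ofList r) = true := by
      simpa [Function.comp, hcontar] using hbad
    simp [hbad, hbad']
  · have hbad' : (r0 :: rest).any ((fun r => decide (((PySem.Set.inter (PySem.Set.ofList jogo) r).length : Int) = 14)
        || decide (((PySem.Set.inter (PySem.Set.ofList jogo) r).length : Int) = 15)) ∘ fun r => PySem.Set.ofList r) = false := by
      simpa [Function.comp, hcontar] using hbad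
    simp only [hbad', Bool.false_eq_true, if_false]
    rw [List.map_cons, PySem.List.max?_id_cons]
    simp only [hbad]
    have hfold :
        ((r0 :: rest).map (fun r => PySem.Set.ofList r)).foldl
            (fun acc r => max acc ((PySem.Set.inter (PySem.Set.ofList jogo) r).length : Int)) 0
          = (rest.map (fun resultado => contar_acertos jogo resultado)).foldl max (contar_acertos jogo r0) := by
      rw [List.foldl_map, List.foldl_map]
      simp only [List.foldl_cons, hcontar]
      have h0 : max 0 (contar_acertos jogo r0) = contar_acertos jogo r0 :=
        max_eq_right (Int.natCast_nonneg _)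
      rw [h0]
    rw [hfold]
    simp

theorem body_eq (resultados jogos_filtrados : List (List Int)) (h : resultados ≠ []) :
    encontrar_jogos_similares resultados jogos_filtrados
      = encontrar_jogos_similares_alt resultados jogos_filtrados := by
  unfold encontrar_jogos_similares encontrar_jogos_similares_alt
  have : jogos_filtrados.foldl (fun acc jogo =>
      if !(jogo_nao_foi_sorteado_com_pontos resultados jogo) then acc
      else
        match PySem.List.max? (resultados.map (fun resultado => contar_acertos jogo resultado)) (fun x => x) with
        | none => acc
        | some m => acc ++ [(jogo, m)]) []
    = jogos_filtrados.foldl (fun acc jogo =>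
      match pvAltScan (PySem.Set.ofList jogo) (resultados.map (fun r => PySem.Set.ofList r)) 0 with
      | none => acc
      | some best => acc ++ [(jogo, best)]) [] := by
    congr 1
    funext acc jogo
    exact step_eq resultados h acc jogo
  simp only [this]

-- ===== VERDICT (by name: the statement is the Claim_ definition above) =====
theorem encontrar_jogos_similares_spec : Claim_equal_encontrar_jogos_similares := by
  intro resultados jogos_filtrados _ hpre
  unfold Spec_encontrar_jogos_similares
  rcases hpre with h | h
  · exact body_eq resultados jogos_filtrados h
  · subst h; rcases resultados with _ | ⟨r, rs⟩ <;> rfl
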